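-- pv_equiv track=rewrite | github.com/mggg/VoteKit | src/votekit/ballot_generator/bloc_slate_generator/slate_utils.py | _lexicographic_symbol_tuple_iterator
-- ===== SOURCE A (Python) =====
-- from typing import Sequence, Iterator
--
-- def _lexicographic_symbol_tuple_iterator(
--     symbol_list: list[str],
-- ) -> Iterator[tuple[str, ...]]:
--     """
--     Given a set of symbols, generate all possible combinations of symbols.
--
--     Example:
--         symbol_list = ["A", "A", "B"]
--         returns {("A", "A", "B"), ("A", "B", "A"), ("B", "A", "A")}
--
--     Args:
--         symbol_list (list[str]): A list of symbols.
--
--     Returns: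
--         set[tuple[str]]: A set of tuples of strings.
--     """
--     n = len(symbol_list)
--     if n == 0:
--         return
--
--     # sort lexicographically
--     current_symbol_perm = sorted(symbol_list)
--
--     # Idea here is to make the smallest possible change to the between steps that increases
--     # the lexicographic cost (so we will find the next thing in the lexicographic ordering)
--     while True:
--         yield tuple(current_symbol_perm)
--
--         # find the longest non-increasing suffix (fails when you have reverse lex order and returns)
--         # start from the right and stop when you find a[i] < a[i+1]
--         i = n - 2
--         while i >= 0 and current_symbol_perm[i] >= current_symbol_perm[i + 1]:
--             i -= 1
--         if i < 0:
--             return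
--
--         # find rightmost element greater than a[i]. This may not be a[i+1] because of duplicates
--         j = n - 1
--         while current_symbol_perm[j] <= current_symbol_perm[i]:
--             j -= 1
--
--         # swap pivot with successor
--         current_symbol_perm[i], current_symbol_perm[j] = (
--             current_symbol_perm[j],
--             current_symbol_perm[i],
--         )
--
--         # reverse the suffix to get the next smallest lexicographic ordering (so the suffix should
--         # b in non-decreasing order now)
--         current_symbol_perm[i + 1 :] = reversed(current_symbol_perm[i + 1 :])
-- ===== SOURCE B (Python) =====
-- from typing import Iterator
--
--
-- def _dedup_adjacent(sorted_symbols: list[str]) -> list[str]: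
--     """Distinct symbols of an already-sorted list, in order (duplicates are adjacent)."""
--     out = []
--     for c in sorted_symbols:
--         if not out or out[-1] != c:
--             out.append(c)
--     return out
--
--
-- def _lexicographic_symbol_tuple_iterator(
--     symbol_list: list[str],
-- ) -> Iterator[tuple[str, ...]]:
--     """Recursive choice-at-each-position enumeration of the distinct permutations
--     of symbol_list in lexicographic order (same stream as the next-permutation loop)."""
--
--     def rec(remaining: list[str]) -> Iterator[tuple[str, ...]]:
--         if not remaining:
--             yield ()
--             return
--         for c in _dedup_adjacent(remaining):
--             rest = remaining.copy()
--             rest.remove(c)  # drop the first occurrence of c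
--             for suffix in rec(rest):
--                 yield (c,) + suffix
--
--     if not symbol_list:
--         return
--     yield from rec(sorted(symbol_list))
-- ===== Notes on version B (the rewrite author's own statement) =====
-- stated objective: alternative
-- what changed: A streams distinct permutations with an in-place iterative next-permutation loop (pivot scan, successor swap, suffix reversal); B instead builds the same lexicographic stream recursively, choosing at each position the next distinct symbol of the sorted remaining multiset and recursing on the diminished multiset.
import Mathlib
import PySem

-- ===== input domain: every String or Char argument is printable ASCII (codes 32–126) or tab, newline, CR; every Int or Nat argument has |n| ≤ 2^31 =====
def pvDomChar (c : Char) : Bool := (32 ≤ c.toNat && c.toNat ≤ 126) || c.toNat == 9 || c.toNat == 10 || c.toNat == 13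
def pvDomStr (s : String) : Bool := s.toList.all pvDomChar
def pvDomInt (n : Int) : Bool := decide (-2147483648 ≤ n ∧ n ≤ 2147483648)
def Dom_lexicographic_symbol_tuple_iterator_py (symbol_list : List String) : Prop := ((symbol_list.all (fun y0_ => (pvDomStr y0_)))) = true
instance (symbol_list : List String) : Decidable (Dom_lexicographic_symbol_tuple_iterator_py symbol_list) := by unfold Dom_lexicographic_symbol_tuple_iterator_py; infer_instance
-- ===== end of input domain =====

-- B replaces A's iterative next-permutation loop by a recursive choice-at-each-position
-- enumeration over the sorted multiset (objective: alternative algorithm, same output stream).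
-- A only mutates its local sorted copy, never the argument; both ports are pure.

-- ===== PORT A =====
-- Transliteration of A's next-permutation generator. Python string `>=`/`<=` is ported as
-- Lean's lexicographic String order (exact on the printable-ASCII domain). The `0 ≤ j`
-- conjunct in pvSuccLoop and the fuel of pvLoopA only make the recursions total; the
-- proofs below show the loop always stops before either is hit (the fuel n! is never
-- exhausted: the yielded chain has at most n! elements).

-- inner `while i >= 0 and a[i] >= a[i+1]: i -= 1`
def pvPivotLoop (cur : List String) (i : Int) : Int :=
  if h : 0 ≤ i ∧ PySem.List.pyGetD cur (i + 1) "" ≤ PySem.List.pyGetD cur i "" then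
    pvPivotLoop cur (i - 1)
  else i
termination_by (i + 1).toNat
decreasing_by obtain ⟨h1, -⟩ := h; omega

-- inner `while a[j] <= a[i]: j -= 1`  (p = a[i])
def pvSuccLoop (cur : List String) (p : String) (j : Int) : Int :=
  if h : 0 ≤ j ∧ PySem.List.pyGetD cur j "" ≤ p then pvSuccLoop cur p (j - 1) else j
termination_by (j + 1).toNat
decreasing_by obtain ⟨h1, -⟩ := h; omega

-- one iteration of the `while True` body after the yield: find pivot, maybe return,
-- find successor, swap, reverse the suffix
def pvStep (cur : List String) : Option (List String) :=
  let n : Int := cur.length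
  let i := pvPivotLoop cur (n - 2)
  if i < 0 then none
  else
    let j := pvSuccLoop cur (PySem.List.pyGetD cur i "") (n - 1)
    let swapped := PySem.List.pySetD (PySem.List.pySetD cur i (PySem.List.pyGetD cur j ""))
      j (PySem.List.pyGetD cur i "")
    some (PySem.List.slice swapped none (some (i + 1)) ++
      (PySem.List.slice swapped (some (i + 1)) none).reverse)

-- the `while True:` loop, collecting the yields
def pvLoopA : Nat → List String → List (List String)
  | 0, _ => []
  | fuel + 1, cur =>
    cur :: (match pvStep cur with
      | none => []
      | some nxt => pvLoopA fuel nxt)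

def lexicographic_symbol_tuple_iterator_py (symbol_list : List String) : List (List String) :=
  if symbol_list.length = 0 then []
  else pvLoopA (Nat.factorial symbol_list.length) (PySem.List.sorted symbol_list (fun x => x) false)

-- ===== PORT B =====
-- Transliteration of Source B: _dedup_adjacent, then the recursive enumerator.

def pvDedupAdj : List String → List String
  | [] => []
  | [a] => [a]
  | a :: b :: t => if a = b then pvDedupAdj (b :: t) else a :: pvDedupAdj (b :: t)

-- needed by pvBRec's termination argument
lemma pv_mem_dedupAdj : ∀ (l : List String) (c : String), c ∈ pvDedupAdj l → c ∈ l := by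
  intro l
  induction l with
  | nil => intro c h; simp [pvDedupAdj] at h
  | cons a t ih =>
    intro c h
    match t, h with
    | [], h => simp [pvDedupAdj] at h; simp [h]
    | b :: t', h =>
      rw [pvDedupAdj] at h
      by_cases hab : a = b
      · simp [hab] at h
        exact List.mem_cons_of_mem _ (ih c h)
      · simp [hab] at h
        rcases h with h | h
        · simp [h]
        · exact List.mem_cons_of_mem _ (ih c h)

-- `rest = remaining.copy(); rest.remove(c)` is erasing the first occurrence of c
def pvBRec (rem : List String) : List (List String) :=
  if _h : rem = [] then [[]]
  else
    (pvDedupAdj rem).attach.flatMap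
      (fun c => (pvBRec (rem.erase c.1)).map (c.1 :: ·))
termination_by rem.length
decreasing_by
  have hm : c.1 ∈ rem := pv_mem_dedupAdj _ _ c.2
  have := List.length_erase_of_mem hm
  have : 0 < rem.length := List.length_pos_iff.mpr _h
  omega

def lexicographic_symbol_tuple_iterator_py_alt (symbol_list : List String) : List (List String) :=
  if symbol_list = [] then []
  else pvBRec (PySem.List.sorted symbol_list (fun x => x) false)

-- ===== PRECONDITION & SPEC =====
def Spec_lexicographic_symbol_tuple_iterator_py (symbol_list : List String) (out : List (List String)) : Prop := out = lexicographic_symbol_tuple_iterator_py_alt symbol_list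
instance (symbol_list : List String) (out : List (List String)) : Decidable (Spec_lexicographic_symbol_tuple_iterator_py symbol_list out) := by unfold Spec_lexicographic_symbol_tuple_iterator_py; infer_instance

-- ===== CLAIM (what is proved, stated in full; the proofs are below) =====
def Claim_equal_lexicographic_symbol_tuple_iterator_py : Prop := ∀ (symbol_list : List String), Dom_lexicographic_symbol_tuple_iterator_py symbol_list → Spec_lexicographic_symbol_tuple_iterator_py symbol_list (lexicographic_symbol_tuple_iterator_py symbol_list)

-- ===== LEMMAS AND PROOFS =====

-- ---- unfolding equations ----
lemma pvPivotLoop_eq (cur : List String) (i : Int) :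
    pvPivotLoop cur i =
      if 0 ≤ i ∧ PySem.List.pyGetD cur (i + 1) "" ≤ PySem.List.pyGetD cur i "" then
        pvPivotLoop cur (i - 1)
      else i := by
  rw [pvPivotLoop]; simp only [dite_eq_ite]

lemma pvSuccLoop_eq (cur : List String) (p : String) (j : Int) :
    pvSuccLoop cur p j =
      if 0 ≤ j ∧ PySem.List.pyGetD cur j "" ≤ p then pvSuccLoop cur p (j - 1) else j := by
  rw [pvSuccLoop]; simp only [dite_eq_ite]

lemma pvBRec_eq (rem : List String) (h : rem ≠ []) :
    pvBRec rem = (pvDedupAdj rem).flatMap (fun c => (pvBRec (rem.erase c)).map (c :: ·)) := by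
  rw [pvBRec, dif_neg h]
  conv_rhs => rw [← List.attach_map_subtype_val (pvDedupAdj rem)]
  rw [List.flatMap_map]

-- ---- pivot-loop facts ----
lemma pv_pyGetD_nonneg (cur : List String) (i : Int) (h : 0 ≤ i) :
    PySem.List.pyGetD cur i "" = cur.getD i.toNat "" := by
  rw [PySem.List.pyGetD, PySem.List.pyGet?_of_nonneg _ h]; rfl

lemma pvPivotLoop_neg (cur : List String) (i : Int) (h : i < 0) : pvPivotLoop cur i = i := by
  rw [pvPivotLoop_eq]; rw [if_neg]; rintro ⟨h1, -⟩; omega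

lemma pvPivotLoop_nat (cur : List String) (m : Nat) :
    pvPivotLoop cur (m : Int) =
      if cur.getD (m + 1) "" ≤ cur.getD m "" then pvPivotLoop cur ((m : Int) - 1)
      else (m : Int) := by
  rw [pvPivotLoop_eq, pv_pyGetD_nonneg _ _ (by omega), pv_pyGetD_nonneg _ _ (by omega),
    show ((m : Int) + 1).toNat = m + 1 by omega, show ((m : Int)).toNat = m by omega]
  simp

lemma pvSuccLoop_neg (cur : List String) (p : String) (j : Int) (h : j < 0) :
    pvSuccLoop cur p j = j := by
  rw [pvSuccLoop_eq]; rw [if_neg]; rintro ⟨h1, -⟩; omega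

lemma pvSuccLoop_nat (cur : List String) (p : String) (m : Nat) :
    pvSuccLoop cur p (m : Int) =
      if cur.getD m "" ≤ p then pvSuccLoop cur p ((m : Int) - 1) else (m : Int) := by
  rw [pvSuccLoop_eq, pv_pyGetD_nonneg _ _ (by omega),
    show ((m : Int)).toNat = m by omega]
  simp

lemma pvPivotLoop_le (cur : List String) : ∀ (m : Nat), pvPivotLoop cur (m : Int) ≤ m := by
  intro m
  induction m with
  | zero =>
    rw [pvPivotLoop_nat]
    split
    · rw [show ((0:Nat) : Int) - 1 = -1 by norm_num, pvPivotLoop_neg cur (-1) (by norm_num)]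
      norm_num
    · norm_num
  | succ m ih =>
    rw [pvPivotLoop_nat]
    split
    · rw [show ((m+1:Nat) : Int) - 1 = (m : Int) by push_cast; ring]
      omega
    · omega

lemma pvPivotLoop_stop (cur : List String) : ∀ (m : Nat), 0 ≤ pvPivotLoop cur (m : Int) →
    ¬ (cur.getD ((pvPivotLoop cur (m : Int)).toNat + 1) "" ≤ cur.getD (pvPivotLoop cur (m : Int)).toNat "") := by
  intro m
  induction m with
  | zero =>
    rw [pvPivotLoop_nat]
    split
    · rw [show ((0:Nat) : Int) - 1 = -1 by norm_num, pvPivotLoop_neg cur (-1) (by norm_num)]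
      intro h; omega
    · rename_i hc
      intro _
      simpa using hc
  | succ m ih =>
    rw [pvPivotLoop_nat]
    split
    · rw [show ((m+1:Nat) : Int) - 1 = (m : Int) by push_cast; ring]
      exact ih
    · rename_i hc
      intro _
      rw [show (((m+1:Nat) : Int)).toNat = m + 1 by omega]
      exact hc

lemma pvPivotLoop_shift (c : String) (t : List String) : ∀ (m : Nat),
    0 ≤ pvPivotLoop t (m : Int) →
    pvPivotLoop (c :: t) ((m : Int) + 1) = pvPivotLoop t (m : Int) + 1 := by
  intro m
  induction m with
  | zero =>
    intro hge
    rw [pvPivotLoop_nat] at hge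
    rw [show ((0:Nat) : Int) + 1 = ((1:Nat) : Int) by norm_num, pvPivotLoop_nat,
      pvPivotLoop_nat (cur := t)]
    split at hge
    · rw [show ((0:Nat) : Int) - 1 = -1 by norm_num, pvPivotLoop_neg t (-1) (by norm_num)] at hge
      omega
    · rename_i hc
      rw [if_neg (by simpa using hc), if_neg (by simpa using hc)]
      norm_num
  | succ m ih =>
    intro hge
    have hc1 : ((m+1+1:Nat) : Int) = ((m+1:Nat) : Int) + 1 := by push_cast; ring
    have hc2 : ((m+1:Nat) : Int) - 1 = (m : Int) := by push_cast; ring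
    rw [pvPivotLoop_nat] at hge
    rw [show ((m+1:Nat) : Int) + 1 = ((m+1+1:Nat) : Int) by push_cast; ring,
      pvPivotLoop_nat, pvPivotLoop_nat (cur := t)]
    split at hge
    · rename_i hc
      rw [hc2] at hge
      rw [if_pos (by simpa using hc), if_pos hc, hc2,
        show ((m+1+1:Nat) : Int) - 1 = (m : Int) + 1 by push_cast; ring]
      exact ih hge
    · rename_i hc
      rw [if_neg (by simpa using hc), if_neg hc, hc1]

lemma pvPivotLoop_skip (cur : List String) : ∀ (m : Nat),
    (∀ k : Nat, 1 ≤ k → k ≤ m → cur.getD (k + 1) "" ≤ cur.getD k "") →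
    pvPivotLoop cur (m : Int) = pvPivotLoop cur 0 := by
  intro m
  induction m with
  | zero => intro _; norm_num
  | succ m ih =>
    intro h
    rw [pvPivotLoop_nat, if_pos (h (m+1) (by omega) le_rfl),
      show ((m+1:Nat) : Int) - 1 = (m : Int) by push_cast; ring]
    exact ih (fun k h1 h2 => h k h1 (by omega))

-- ---- successor-loop facts ----
lemma pvSuccLoop_found (cur : List String) (p : String) : ∀ (m : Nat),
    (∃ k : Nat, k ≤ m ∧ ¬ (cur.getD k "" ≤ p)) → 0 ≤ pvSuccLoop cur p (m : Int) := by
  intro m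
  induction m with
  | zero =>
    rintro ⟨k, hk, hgt⟩
    interval_cases k
    rw [pvSuccLoop_nat, if_neg hgt]
    positivity
  | succ m ih =>
    rintro ⟨k, hk, hgt⟩
    rw [pvSuccLoop_nat]
    split
    · rename_i hc
      have hkm : k ≤ m := by
        rcases Nat.lt_or_ge k (m+1) with h | h
        · omega
        · exact absurd hc (by rw [show k = m + 1 by omega] at hgt; exact hgt)
      rw [show ((m+1:Nat) : Int) - 1 = (m : Int) by push_cast; ring]
      exact ih ⟨k, hkm, hgt⟩
    · positivity

lemma pvSuccLoop_shift (c : String) (t : List String) (p : String) : ∀ (m : Nat),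
    0 ≤ pvSuccLoop t p (m : Int) →
    pvSuccLoop (c :: t) p ((m : Int) + 1) = pvSuccLoop t p (m : Int) + 1 := by
  intro m
  induction m with
  | zero =>
    intro hge
    rw [pvSuccLoop_nat] at hge
    rw [show ((0:Nat) : Int) + 1 = ((1:Nat) : Int) by norm_num, pvSuccLoop_nat,
      pvSuccLoop_nat (cur := t)]
    split at hge
    · rw [show ((0:Nat) : Int) - 1 = -1 by norm_num, pvSuccLoop_neg t p (-1) (by norm_num)] at hge
      omega
    · rename_i hc
      rw [if_neg (by simpa using hc), if_neg (by simpa using hc)]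
      norm_num
  | succ m ih =>
    intro hge
    have hc2 : ((m+1:Nat) : Int) - 1 = (m : Int) := by push_cast; ring
    rw [pvSuccLoop_nat] at hge
    rw [show ((m+1:Nat) : Int) + 1 = ((m+1+1:Nat) : Int) by push_cast; ring,
      pvSuccLoop_nat, pvSuccLoop_nat (cur := t)]
    split at hge
    · rename_i hc
      rw [hc2] at hge
      rw [if_pos (by simpa using hc), if_pos hc, hc2,
        show ((m+1+1:Nat) : Int) - 1 = (m : Int) + 1 by push_cast; ring]
      exact ih hge
    · rename_i hc
      rw [if_neg (by simpa using hc), if_neg hc]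
      push_cast; ring

lemma pvSuccLoop_skip (cur : List String) (p : String) (j0 : Nat) : ∀ (m : Nat), j0 ≤ m →
    (∀ k : Nat, j0 < k → k ≤ m → cur.getD k "" ≤ p) →
    pvSuccLoop cur p (m : Int) = pvSuccLoop cur p (j0 : Int) := by
  intro m
  induction m with
  | zero => intro h _; rw [Nat.le_zero.mp h]
  | succ m ih =>
    intro hle h
    rcases Nat.lt_or_ge j0 (m+1) with hlt | hge
    · rw [pvSuccLoop_nat, if_pos (h (m+1) hlt le_rfl),
        show ((m+1:Nat) : Int) - 1 = (m : Int) by push_cast; ring]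
      exact ih (by omega) (fun k h1 h2 => h k h1 (by omega))
    · rw [show j0 = m + 1 by omega]

lemma pvSuccLoop_stop (cur : List String) (p : String) (j0 : Nat)
    (h : ¬ (cur.getD j0 "" ≤ p)) : pvSuccLoop cur p (j0 : Int) = j0 := by
  rw [pvSuccLoop_nat, if_neg h]

-- ---- pvStep characterizations ----
lemma pvStep_of_pivots (cur : List String) (iN jN : Nat)
    (hpiv : pvPivotLoop cur ((cur.length : Int) - 2) = (iN : Int))
    (hsucc : pvSuccLoop cur (cur.getD iN "") ((cur.length : Int) - 1) = (jN : Int)) :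
    pvStep cur = some
      (((cur.set iN (cur.getD jN "")).set jN (cur.getD iN "")).take (iN + 1) ++
       (((cur.set iN (cur.getD jN "")).set jN (cur.getD iN "")).drop (iN + 1)).reverse) := by
  rw [pvStep]
  simp only [hpiv]
  rw [if_neg (by omega)]
  rw [pv_pyGetD_nonneg cur (iN : Int) (by omega), Int.toNat_natCast, hsucc]
  rw [pv_pyGetD_nonneg cur (jN : Int) (by omega), Int.toNat_natCast]
  simp only [PySem.List.pySetD_natCast]
  rw [PySem.List.slice_to _ (by omega : (0:Int) ≤ (iN : Int) + 1),
    PySem.List.slice_from _ (by omega : (0:Int) ≤ (iN : Int) + 1),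
    show ((iN : Int) + 1).toNat = iN + 1 by omega]

-- mid-block: the pivot is inside the tail, so a cons is carried through unchanged
lemma pvStep_neg (cur : List String) (h : pvPivotLoop cur ((cur.length : Int) - 2) < 0) :
    pvStep cur = none := by
  rw [pvStep]
  simp only []
  rw [if_pos h]

lemma pvStep_cons_shift (c : String) (t t' : List String) (h : pvStep t = some t') :
    pvStep (c :: t) = some (c :: t') := by
  have hlen : 2 ≤ t.length := by
    by_contra hlt
    rw [pvStep_neg t (by rw [pvPivotLoop_neg t _ (by omega)]; omega)] at h
    simp at h
  have hm2 : ((t.length : Int)) - 2 = ((t.length - 2 : Nat) : Int) := by omega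
  have hge : 0 ≤ pvPivotLoop t ((t.length : Int) - 2) := by
    by_contra hlt
    rw [pvStep_neg t (by omega)] at h
    simp at h
  set r := pvPivotLoop t ((t.length : Int) - 2) with hr
  set iN := r.toNat with hiN
  have hrN : r = (iN : Int) := by omega
  have hle : r ≤ ((t.length - 2 : Nat) : Int) := by
    rw [hr, hm2]; exact pvPivotLoop_le t _
  have hstop : ¬ (t.getD (iN + 1) "" ≤ t.getD iN "") := by
    have := pvPivotLoop_stop t (t.length - 2)
    rw [← hm2, ← hr] at this
    exact this hge
  have hfound : 0 ≤ pvSuccLoop t (t.getD iN "") ((t.length - 1 : Nat) : Int) :=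
    pvSuccLoop_found t _ _ ⟨iN + 1, by omega, hstop⟩
  have hm1 : ((t.length : Int)) - 1 = ((t.length - 1 : Nat) : Int) := by omega
  set s2 := pvSuccLoop t (t.getD iN "") ((t.length - 1 : Nat) : Int) with hs2
  set jN := s2.toNat with hjN
  have hsN : s2 = (jN : Int) := by omega
  have hpivT : pvPivotLoop t ((t.length : Int) - 2) = (iN : Int) := by rw [← hr, hrN]
  have hsuccT : pvSuccLoop t (t.getD iN "") ((t.length : Int) - 1) = (jN : Int) := by
    rw [hm1, ← hs2, hsN]
  have hstepT := pvStep_of_pivots t iN jN hpivT hsuccT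
  rw [hstepT] at h
  have ht' := Option.some.inj h
  -- now the cons side
  have hpivC : pvPivotLoop (c :: t) (((c :: t).length : Int) - 2) = ((iN + 1 : Nat) : Int) := by
    have : (((c :: t).length : Int)) - 2 = ((t.length - 2 : Nat) : Int) + 1 := by
      simp [List.length_cons]; omega
    rw [this, pvPivotLoop_shift c t (t.length - 2) (by rw [← hm2]; exact hge), ← hm2, hpivT]
    push_cast; ring
  have hsuccC : pvSuccLoop (c :: t) ((c :: t).getD (iN + 1) "") (((c :: t).length : Int) - 1)
      = ((jN + 1 : Nat) : Int) := by
    have hg : (c :: t).getD (iN + 1) "" = t.getD iN "" := by simp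
    have : (((c :: t).length : Int)) - 1 = ((t.length - 1 : Nat) : Int) + 1 := by
      simp [List.length_cons]; omega
    rw [hg, this, pvSuccLoop_shift c t _ (t.length - 1) (by rw [← hs2]; exact hfound),
      ← hs2, hsN]
    push_cast; ring
  rw [pvStep_of_pivots (c :: t) (iN + 1) (jN + 1) hpivC hsuccC, ← ht']
  simp

-- end of a block: the list is `c` followed by a reversed sorted tail
lemma pv_getD_cons_rev (c : String) (w : List String) (k : Nat)
    (hk1 : 1 ≤ k) (hk2 : k ≤ w.length) :
    (c :: w.reverse).getD k "" = w[w.length - k]'(by omega) := by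
  obtain ⟨k', rfl⟩ : ∃ k', k = k' + 1 := ⟨k - 1, by omega⟩
  rw [List.getD_cons_succ, List.getD_eq_getElem _ _ (by simp; omega), List.getElem_reverse]
  congr 1
  omega

lemma pv_rev_adj (c : String) (w : List String) (hw : w.Pairwise (· ≤ ·)) :
    ∀ k : Nat, 1 ≤ k → k ≤ w.length - 1 →
    (c :: w.reverse).getD (k + 1) "" ≤ (c :: w.reverse).getD k "" := by
  intro k h1 h2
  rw [pv_getD_cons_rev c w k h1 (by omega), pv_getD_cons_rev c w (k+1) (by omega) (by omega)]
  exact List.pairwise_iff_getElem.mp hw _ _ (by omega) (by omega) (by omega)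

lemma pv_pivot_skip_rev (c : String) (w : List String) (hw : w.Pairwise (· ≤ ·)) (hne : w ≠ []) :
    pvPivotLoop (c :: w.reverse) (((c :: w.reverse).length : Int) - 2) =
      pvPivotLoop (c :: w.reverse) 0 := by
  have hlen : (c :: w.reverse).length = w.length + 1 := by simp
  have hc : ((( c :: w.reverse).length : Int)) - 2 = ((w.length - 1 : Nat) : Int) := by
    rw [hlen]
    have : 1 ≤ w.length := List.length_pos_iff.mpr hne
    omega
  rw [hc]
  exact pvPivotLoop_skip _ _ (fun k h1 h2 => pv_rev_adj c w hw k h1 h2)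

lemma pvStep_none (c : String) (w : List String)
    (hw : w.Pairwise (· ≤ ·)) (hwc : ∀ x ∈ w, x ≤ c) :
    pvStep (c :: w.reverse) = none := by
  rcases eq_or_ne w [] with rfl | hne
  · apply pvStep_neg
    simp only [List.reverse_nil]
    rw [pvPivotLoop_neg _ _ (by simp)]
    simp
  have hwl : 1 ≤ w.length := List.length_pos_iff.mpr hne
  apply pvStep_neg
  rw [pv_pivot_skip_rev c w hw hne,
    show (0:Int) = ((0:Nat):Int) by norm_num, pvPivotLoop_nat]
  rw [if_pos (by
    rw [pv_getD_cons_rev c w 1 le_rfl hwl]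
    show _ ≤ (c :: w.reverse).getD 0 ""
    simp only [List.getD_cons_zero]
    exact hwc _ (List.getElem_mem _))]
  rw [show ((0:Nat):Int) - 1 = -1 by norm_num, pvPivotLoop_neg _ _ (by norm_num)]
  norm_num

lemma pv_getElem_append_mem_right (l₁ l₂ : List String) (i : Nat) (hi : l₁.length ≤ i)
    (h : i < (l₁ ++ l₂).length) : (l₁ ++ l₂)[i] ∈ l₂ := by
  rw [List.getElem_append_right hi]; exact List.getElem_mem _

lemma pv_getElem_append_mem_left (l₁ l₂ : List String) (i : Nat) (hi : i < l₁.length)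
    (h : i < (l₁ ++ l₂).length) : (l₁ ++ l₂)[i] ∈ l₁ := by
  rw [List.getElem_append_left hi]; exact List.getElem_mem _

lemma pv_getElem_append_mid (l₁ l₂ : List String) (x : String) (i : Nat) (hi : i = l₁.length)
    (h : i < (l₁ ++ x :: l₂).length) : (l₁ ++ x :: l₂)[i] = x := by
  subst hi
  rw [List.getElem_append_right le_rfl]
  simp

lemma pvStep_block_end (a b' : List String) (c d' : String)
    (hw : (a ++ d' :: b').Pairwise (· ≤ ·))
    (ha : ∀ x ∈ a, x ≤ c) (hcd : c < d') :
    pvStep (c :: (a ++ d' :: b').reverse) = some (d' :: (a ++ c :: b')) := by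
  have hwlen : (a ++ d' :: b').length = a.length + b'.length + 1 := by simp; omega
  have hwne : (a ++ d' :: b') ≠ [] := by simp
  have hwl : 1 ≤ (a ++ d' :: b').length := by omega
  have hcur : (c :: (a ++ d' :: b').reverse).length = (a ++ d' :: b').length + 1 := by simp; omega
  have hdb : (d' :: b').Pairwise (· ≤ ·) := (List.pairwise_append.mp hw).2.1
  have hcall : ∀ x ∈ d' :: b', c < x := by
    intro x hx
    rcases List.mem_cons.mp hx with rfl | hx'
    · exact hcd
    · exact lt_of_lt_of_le hcd (List.rel_of_pairwise_cons hdb hx')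
  -- the pivot is position 0
  have hpiv : pvPivotLoop (c :: (a ++ d' :: b').reverse)
      (((c :: (a ++ d' :: b').reverse).length : Int) - 2) = ((0:Nat) : Int) := by
    rw [pv_pivot_skip_rev c _ hw hwne,
      show (0:Int) = ((0:Nat):Int) by norm_num, pvPivotLoop_nat]
    rw [if_neg (by
      rw [pv_getD_cons_rev c _ 1 le_rfl hwl]
      show ¬ _ ≤ (c :: (a ++ d' :: b').reverse).getD 0 ""
      simp only [List.getD_cons_zero]
      rw [not_le]
      exact hcall _ (pv_getElem_append_mem_right a (d' :: b') _ (by omega) (by omega)))]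
  -- the successor is position b'.length + 1
  have hgd0 : (c :: (a ++ d' :: b').reverse).getD 0 "" = c := by simp
  have hgdj : (c :: (a ++ d' :: b').reverse).getD (b'.length + 1) "" = d' := by
    rw [pv_getD_cons_rev c _ (b'.length + 1) (by omega) (by omega)]
    exact pv_getElem_append_mid a b' d' _ (by omega) (by omega)
  have hsucc : pvSuccLoop (c :: (a ++ d' :: b').reverse)
      ((c :: (a ++ d' :: b').reverse).getD 0 "")
      (((c :: (a ++ d' :: b').reverse).length : Int) - 1) = ((b'.length + 1 : Nat) : Int) := by
    have hc1 : (((c :: (a ++ d' :: b').reverse).length : Int)) - 1 =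
        (((a ++ d' :: b').length : Nat) : Int) := by
      rw [hcur]; omega
    rw [hc1, hgd0]
    rw [pvSuccLoop_skip (c :: (a ++ d' :: b').reverse) c (b'.length + 1)
      (a ++ d' :: b').length (by omega) ?hskip]
    · exact pvSuccLoop_stop _ _ _ (by rw [hgdj]; exact not_le.mpr hcd)
    case hskip =>
      intro k hk1 hk2
      rw [pv_getD_cons_rev c _ k (by omega) hk2]
      exact ha _ (pv_getElem_append_mem_left a (d' :: b') _ (by omega) (by omega))
  rw [pvStep_of_pivots _ 0 (b'.length + 1) hpiv hsucc, hgd0, hgdj]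
  -- now compute the swap and the suffix reversal
  have hrev : (a ++ d' :: b').reverse = (b'.reverse ++ [d']) ++ a.reverse := by
    simp
  congr 1
  rw [hrev]
  simp only [List.set_cons_zero, List.set_cons_succ]
  have hset : ((b'.reverse ++ [d']) ++ a.reverse).set b'.length c =
      (b'.reverse ++ [c]) ++ a.reverse := by
    rw [List.append_assoc, List.append_assoc,
      show b'.length = b'.reverse.length + 0 by simp,
      List.set_append_right _ _ (by simp)]
    simp
  rw [hset]
  simp

-- ---- the trajectory relation ----
-- `PvSeg x l o`: starting from state x the loop yields exactly l and then the next
-- pvStep (after the last yielded state) is o.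
inductive PvSeg : List String → List (List String) → Option (List String) → Prop where
  | single (x : List String) : PvSeg x [x] (pvStep x)
  | cons (x y : List String) (l : List (List String)) (o : Option (List String))
      (hs : pvStep x = some y) (hl : PvSeg y l o) : PvSeg x (x :: l) o

lemma pv_seg_ne_nil {x : List String} {l : List (List String)} {o : Option (List String)}
    (h : PvSeg x l o) : l ≠ [] := by
  cases h <;> simp

lemma pv_seg_append_aux : ∀ {x : List String} {l : List (List String)} {oy : Option (List String)},
    PvSeg x l oy → ∀ {y : List String} {l' : List (List String)} {o : Option (List String)},
    oy = some y → PvSeg y l' o → PvSeg x (l ++ l') o := by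
  intro x l oy h
  induction h with
  | single x =>
    intro y l' o ho h'
    exact PvSeg.cons _ _ _ _ ho h'
  | cons x z l o hs hl ih =>
    intro y l' o' ho h'
    exact PvSeg.cons _ _ _ _ hs (ih ho h')

lemma pv_seg_append {x y : List String} {l l' : List (List String)} {o : Option (List String)}
    (h : PvSeg x l (some y)) (h' : PvSeg y l' o) : PvSeg x (l ++ l') o :=
  pv_seg_append_aux h rfl h'

lemma pv_seg_map_aux (c : String) : ∀ {t : List String} {l : List (List String)}
    {oy : Option (List String)}, PvSeg t l oy → oy = none → ∀ {e : List String},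
    l.getLast? = some e → PvSeg (c :: t) (l.map (c :: ·)) (pvStep (c :: e)) := by
  intro t l oy h
  induction h with
  | single x =>
    intro _ e hlast
    simp only [List.getLast?_singleton, Option.some.injEq] at hlast
    subst hlast
    exact PvSeg.single _
  | cons x y l o hs hl ih =>
    intro ho e hlast
    obtain ⟨z, l'', rfl⟩ := List.exists_cons_of_ne_nil (pv_seg_ne_nil hl)
    rw [List.getLast?_cons_cons] at hlast
    exact PvSeg.cons _ _ _ _ (pvStep_cons_shift c x y hs) (ih ho hlast)

lemma pv_seg_map (c : String) {t : List String} {l : List (List String)} {e : List String}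
    (h : PvSeg t l none) (hlast : l.getLast? = some e) :
    PvSeg (c :: t) (l.map (c :: ·)) (pvStep (c :: e)) :=
  pv_seg_map_aux c h rfl hlast

lemma pv_seg_loop_aux : ∀ {x : List String} {l : List (List String)}
    {oy : Option (List String)}, PvSeg x l oy → oy = none →
    ∀ f : Nat, l.length ≤ f → pvLoopA f x = l := by
  intro x l oy h
  induction h with
  | single x =>
    intro ho f hf
    obtain ⟨f', rfl⟩ : ∃ f', f = f' + 1 := ⟨f - 1, by simp at hf; omega⟩
    rw [pvLoopA, ho]
  | cons x y l o hs hl ih =>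
    intro ho f hf
    obtain ⟨f', rfl⟩ : ∃ f', f = f' + 1 := ⟨f - 1, by simp at hf; omega⟩
    rw [pvLoopA, hs]
    show x :: pvLoopA f' y = x :: l
    rw [ih ho f' (by simp at hf; omega)]

lemma pv_seg_loop {x : List String} {l : List (List String)} (h : PvSeg x l none) :
    ∀ f : Nat, l.length ≤ f → pvLoopA f x = l :=
  pv_seg_loop_aux h rfl

-- ---- sorted-list bookkeeping ----
lemma pv_const_append (t : List String) (d : String) (h : ∀ y ∈ t, y = d) :
    t ++ [d] = d :: t := by
  induction t with
  | nil => simp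
  | cons a t ih =>
    have ha : a = d := h a (by simp)
    simp only [List.cons_append, ha, List.cons.injEq, true_and]
    exact ih (fun y hy => h y (by simp [hy]))

-- erasing a maximal element of a sorted list and putting it back at the end is the identity
lemma pv_erase_max (p : List String) (d : String)
    (hp : p.Pairwise (· ≤ ·)) (hd : d ∈ p) (hle : ∀ x ∈ p, x ≤ d) :
    p.erase d ++ [d] = p := by
  induction p with
  | nil => simp at hd
  | cons a t ih =>
    have hat : ∀ y ∈ t, a ≤ y := fun y hy => List.rel_of_pairwise_cons hp hy
    rcases eq_or_ne a d with rfl | hne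
    · rw [List.erase_cons_head]
      exact pv_const_append t a (fun y hy =>
        le_antisymm (hle y (List.mem_cons_of_mem _ hy)) (hat y hy))
    · rw [List.erase_cons_tail (by simpa using hne)]
      have hdt : d ∈ t := by
        rcases List.mem_cons.mp hd with h | h
        · exact absurd h.symm hne
        · exact h
      rw [List.cons_append, ih (List.Pairwise.sublist (List.sublist_cons_self a t) hp) hdt
        (fun x hx => hle x (List.mem_cons_of_mem _ hx))]

lemma pv_dedupAdj_cons_sorted (d : String) : ∀ (t : List String),
    (d :: t).Pairwise (· ≤ ·) →
    pvDedupAdj (d :: t) = d :: pvDedupAdj (t.dropWhile (fun x => decide (x ≤ d))) := by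
  intro t
  induction t with
  | nil => intro _; simp [pvDedupAdj]
  | cons b t' ih =>
    intro hp
    have hdb : d ≤ b := List.rel_of_pairwise_cons hp (by simp)
    have hpt : (b :: t').Pairwise (· ≤ ·) := List.Pairwise.sublist (List.sublist_cons_self d _) hp
    rw [List.dropWhile_cons]
    by_cases hbd : b ≤ d
    · have hbd' : b = d := le_antisymm hbd hdb
      subst hbd'
      rw [if_pos (by simp)]
      rw [show pvDedupAdj (b :: b :: t') = pvDedupAdj (b :: t') by rw [pvDedupAdj]; simp]
      exact ih hpt
    · rw [if_neg (by simpa using hbd)]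
      have hne : d ≠ b := fun h => hbd (h ▸ le_refl d)
      rw [show pvDedupAdj (d :: b :: t') = d :: pvDedupAdj (b :: t') by
        rw [pvDedupAdj]; simp [hne]]

lemma pv_dedupAdj_length : ∀ (l : List String), (pvDedupAdj l).length ≤ l.length := by
  intro l
  induction l with
  | nil => simp [pvDedupAdj]
  | cons a t ih =>
    cases t with
    | nil => simp [pvDedupAdj]
    | cons b t' =>
      rw [pvDedupAdj]
      split
      · exact le_trans ih (by simp)
      · simpa using ih

lemma pv_bRec_length : ∀ (N : Nat) (rem : List String), rem.length ≤ N →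
    (pvBRec rem).length ≤ Nat.factorial rem.length := by
  intro N
  induction N with
  | zero =>
    intro rem h
    have hr : rem = [] := List.length_eq_zero_iff.mp (by omega)
    subst hr
    rw [pvBRec]
    simp
  | succ N ih =>
    intro rem h
    rcases eq_or_ne rem [] with rfl | hne
    · rw [pvBRec]; simp
    · have hpos : 0 < rem.length := List.length_pos_iff.mpr hne
      rw [pvBRec_eq rem hne, List.length_flatMap]
      have hbound : ∀ c ∈ pvDedupAdj rem,
          ((pvBRec (rem.erase c)).map (c :: ·)).length ≤ Nat.factorial (rem.length - 1) := by
        intro c hc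
        have hcm : c ∈ rem := pv_mem_dedupAdj rem c hc
        have hel : (rem.erase c).length = rem.length - 1 := List.length_erase_of_mem hcm
        rw [List.length_map, ← hel]
        exact ih (rem.erase c) (by omega)
      calc ((pvDedupAdj rem).map
            (fun c => ((pvBRec (rem.erase c)).map (c :: ·)).length)).sum
          ≤ ((pvDedupAdj rem).map
            (fun _ => Nat.factorial (rem.length - 1))).sum :=
            List.sum_le_sum hbound
        _ = (pvDedupAdj rem).length * Nat.factorial (rem.length - 1) := by
            rw [List.map_const', List.sum_replicate, smul_eq_mul]
        _ ≤ rem.length * Nat.factorial (rem.length - 1) :=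
            Nat.mul_le_mul_right _ (pv_dedupAdj_length rem)
        _ = Nat.factorial rem.length := by
            obtain ⟨n, hn⟩ : ∃ n, rem.length = n + 1 := ⟨rem.length - 1, by omega⟩
            rw [hn]
            simp [Nat.factorial_succ]

-- ---- the main induction ----
def pvTailBlocks (s : List String) (d : String) : List (List String) :=
  (d :: pvDedupAdj (s.dropWhile (fun x => decide (x ≤ d)))).flatMap
    (fun e => (pvBRec (s.erase e)).map (e :: ·))

lemma pv_dropWhile_head_false (p : String → Bool) : ∀ (s l : List String) (x : String),
    s.dropWhile p = x :: l → p x = false := by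
  intro s
  induction s with
  | nil => intro l x h; simp at h
  | cons a t ih =>
    intro l x h
    rw [List.dropWhile_cons] at h
    split at h
    · exact ih _ _ h
    · cases h; rename_i hc; simpa using hc

lemma pv_bRec_eq_tailBlocks (d : String) (t : List String) (hp : (d :: t).Pairwise (· ≤ ·)) :
    pvBRec (d :: t) = pvTailBlocks (d :: t) d := by
  rw [pvBRec_eq _ (by simp), pvTailBlocks]
  rw [pv_dedupAdj_cons_sorted d t hp]
  rw [List.dropWhile_cons, if_pos (by simp)]

lemma pv_block (d : String) (w : List String)
    (HW : w = [] ∨ (PvSeg w (pvBRec w) none ∧ (pvBRec w).getLast? = some w.reverse)) :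
    PvSeg (d :: w) ((pvBRec w).map (d :: ·)) (pvStep (d :: w.reverse)) ∧
    ((pvBRec w).map (d :: ·)).getLast? = some (d :: w.reverse) := by
  rcases HW with rfl | ⟨hseg, hlast⟩
  · constructor
    · have := PvSeg.single (d :: ([] : List String))
      simpa [pvBRec] using this
    · rw [pvBRec]
      simp
  · constructor
    · exact pv_seg_map d hseg hlast
    · rw [List.getLast?_map, hlast]
      rfl

lemma pv_main_of_ih (N : Nat)
    (ihN : ∀ (M : Nat) (s : List String) (d : String), s.length ≤ N →
      (s.dropWhile (fun x => decide (x ≤ d))).length ≤ M → s.Pairwise (· ≤ ·) → d ∈ s →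
      PvSeg (d :: s.erase d) (pvTailBlocks s d) none ∧
      (pvTailBlocks s d).getLast? = some s.reverse) :
    ∀ w : List String, w.length ≤ N → w.Pairwise (· ≤ ·) → w ≠ [] →
    PvSeg w (pvBRec w) none ∧ (pvBRec w).getLast? = some w.reverse := by
  intro w hlen hwp hwne
  obtain ⟨dw, tw, rfl⟩ := List.exists_cons_of_ne_nil hwne
  have h := ihN ((dw :: tw).dropWhile (fun x => decide (x ≤ dw))).length (dw :: tw) dw hlen
    le_rfl hwp (by simp)
  rw [List.erase_cons_head, ← pv_bRec_eq_tailBlocks dw tw hwp] at h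
  exact h

lemma pv_main_qnil (N : Nat)
    (hMAIN : ∀ w : List String, w.length ≤ N → w.Pairwise (· ≤ ·) → w ≠ [] →
      PvSeg w (pvBRec w) none ∧ (pvBRec w).getLast? = some w.reverse)
    (s : List String) (d : String) (hp : s.Pairwise (· ≤ ·)) (hd : d ∈ s)
    (hN : s.length ≤ N + 1)
    (hq : s.dropWhile (fun x => decide (x ≤ d)) = []) :
    PvSeg (d :: s.erase d) (pvTailBlocks s d) none ∧
    (pvTailBlocks s d).getLast? = some s.reverse := by
  have hall : ∀ x ∈ s, x ≤ d := by
    intro x hx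
    have hs : s.takeWhile (fun x => decide (x ≤ d)) = s := by
      conv_rhs => rw [← List.takeWhile_append_dropWhile (p := fun x => decide (x ≤ d)) (l := s)]
      rw [hq, List.append_nil]
    rw [← hs] at hx
    simpa using List.mem_takeWhile_imp hx
  have hsw : (s.erase d).Pairwise (· ≤ ·) := hp.sublist List.erase_sublist
  have hwall : ∀ x ∈ s.erase d, x ≤ d := fun x hx => hall x (List.mem_of_mem_erase hx)
  have hnone : pvStep (d :: (s.erase d).reverse) = none := pvStep_none d _ hsw hwall
  have HW : s.erase d = [] ∨
      (PvSeg (s.erase d) (pvBRec (s.erase d)) none ∧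
        (pvBRec (s.erase d)).getLast? = some (s.erase d).reverse) := by
    rcases eq_or_ne (s.erase d) [] with h | h
    · exact Or.inl h
    · refine Or.inr (hMAIN _ ?_ hsw h)
      have h1 := List.length_erase_of_mem hd
      have h2 : 0 < s.length := List.length_pos_of_mem hd
      omega
  obtain ⟨hseg, hlast⟩ := pv_block d (s.erase d) HW
  rw [hnone] at hseg
  have htb : pvTailBlocks s d = (pvBRec (s.erase d)).map (d :: ·) := by
    rw [pvTailBlocks, hq]
    simp [pvDedupAdj]
  have hsr : s.reverse = d :: (s.erase d).reverse := by
    conv_lhs => rw [← pv_erase_max s d hp hd hall]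
    simp
  rw [htb, hsr]
  exact ⟨hseg, hlast⟩

lemma pv_main : ∀ (N M : Nat) (s : List String) (d : String), s.length ≤ N →
    (s.dropWhile (fun x => decide (x ≤ d))).length ≤ M →
    s.Pairwise (· ≤ ·) → d ∈ s →
    PvSeg (d :: s.erase d) (pvTailBlocks s d) none ∧
    (pvTailBlocks s d).getLast? = some s.reverse := by
  intro N
  induction N with
  | zero =>
    intro M s d hN _ _ hd
    have hz : s = [] := List.length_eq_zero_iff.mp (by omega)
    subst hz
    simp at hd
  | succ N ihN =>
    intro M
    induction M with
    | zero =>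
      intro s d hN hM hp hd
      rcases hq : s.dropWhile (fun x => decide (x ≤ d)) with _ | ⟨d₂, b'⟩
      · exact pv_main_qnil N (pv_main_of_ih N ihN) s d hp hd hN hq
      · rw [hq] at hM
        simp at hM
    | succ M ihM =>
      intro s d hN hM hp hd
      rcases hq : s.dropWhile (fun x => decide (x ≤ d)) with _ | ⟨d₂, b'⟩
      · exact pv_main_qnil N (pv_main_of_ih N ihN) s d hp hd hN hq
      · have hMAIN := pv_main_of_ih N ihN
        have hsplit : s.takeWhile (fun x => decide (x ≤ d)) ++ d₂ :: b' = s := by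
          rw [← hq, List.takeWhile_append_dropWhile]
        have hd2d : ¬ d₂ ≤ d := by
          have := pv_dropWhile_head_false _ s _ _ hq
          simpa using this
        have hcd : d < d₂ := not_le.mp hd2d
        have hpd : ∀ x ∈ s.takeWhile (fun x => decide (x ≤ d)), x ≤ d := by
          intro x hx
          simpa using List.mem_takeWhile_imp hx
        have hq_sorted : (d₂ :: b').Pairwise (· ≤ ·) := by
          have := hp.sublist (List.dropWhile_sublist (p := fun x => decide (x ≤ d)))
          rwa [hq] at this
        have hd2b : ∀ x ∈ b', d₂ ≤ x := fun x hx => List.rel_of_pairwise_cons hq_sorted hx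
        have hdnq : d ∈ s.takeWhile (fun x => decide (x ≤ d)) := by
          have hd' := hd
          rw [← hsplit] at hd'
          rcases List.mem_append.mp hd' with h | h
          · exact h
          · rcases List.mem_cons.mp h with rfl | h2
            · exact absurd le_rfl hd2d
            · exact absurd (hd2b d h2) hd2d
        have hwe : s.erase d = (s.takeWhile (fun x => decide (x ≤ d))).erase d ++ d₂ :: b' := by
          conv_lhs => rw [← hsplit]
          rw [List.erase_append_left _ hdnq]
        have hsw : (s.erase d).Pairwise (· ≤ ·) := hp.sublist List.erase_sublist
        have haw : ((s.takeWhile (fun x => decide (x ≤ d))).erase d ++ d₂ :: b').Pairwise (· ≤ ·) := by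
          rw [← hwe]
          exact hsw
        have hale : ∀ x ∈ (s.takeWhile (fun x => decide (x ≤ d))).erase d, x ≤ d :=
          fun x hx => hpd x (List.mem_of_mem_erase hx)
        have hstep := pvStep_block_end ((s.takeWhile (fun x => decide (x ≤ d))).erase d) b'
          d d₂ haw hale hcd
        have hppair : (s.takeWhile (fun x => decide (x ≤ d))).Pairwise (· ≤ ·) :=
          hp.sublist (List.takeWhile_sublist _)
        have hpfull : (s.takeWhile (fun x => decide (x ≤ d))).erase d ++ [d] =
            s.takeWhile (fun x => decide (x ≤ d)) := pv_erase_max _ d hppair hdnq hpd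
        have hd2np : d₂ ∉ s.takeWhile (fun x => decide (x ≤ d)) := fun h => hd2d (hpd _ h)
        have herase2 : s.erase d₂ = s.takeWhile (fun x => decide (x ≤ d)) ++ b' := by
          conv_lhs => rw [← hsplit]
          rw [List.erase_append_right _ hd2np, List.erase_cons_head]
        have hkey : (s.takeWhile (fun x => decide (x ≤ d))).erase d ++ d :: b' = s.erase d₂ := by
          rw [herase2]
          conv_rhs => rw [← hpfull]
          simp
        have HW : s.erase d = [] ∨
            (PvSeg (s.erase d) (pvBRec (s.erase d)) none ∧
              (pvBRec (s.erase d)).getLast? = some (s.erase d).reverse) := by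
          refine Or.inr (hMAIN _ ?_ hsw (by rw [hwe]; simp))
          have h1 := List.length_erase_of_mem hd
          have h2 : 0 < s.length := List.length_pos_of_mem hd
          omega
        obtain ⟨hseg, hlast⟩ := pv_block d (s.erase d) HW
        have hstep' : pvStep (d :: (s.erase d).reverse) = some (d₂ :: s.erase d₂) := by
          rw [hwe, hstep, hkey]
        rw [hstep'] at hseg
        have hd2s : d₂ ∈ s := by
          rw [← hsplit]
          simp
        have hdw2 : s.dropWhile (fun x => decide (x ≤ d₂)) =
            b'.dropWhile (fun x => decide (x ≤ d₂)) := by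
          conv_lhs => rw [← hsplit]
          rw [List.dropWhile_append_of_pos
            (by intro x hx; simpa using le_trans (hpd x hx) hcd.le),
            List.dropWhile_cons, if_pos (by simp)]
        have hlen2 : (s.dropWhile (fun x => decide (x ≤ d₂))).length ≤ M := by
          rw [hdw2]
          have h1 : (b'.dropWhile (fun x => decide (x ≤ d₂))).length ≤ b'.length :=
            (List.dropWhile_sublist _).length_le
          have h2 : (d₂ :: b').length ≤ M + 1 := by rw [← hq]; exact hM
          simp at h2
          omega
        obtain ⟨hseg2, hlast2⟩ := ihM s d₂ hN hlen2 hp hd2s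
        have hcomp := pv_seg_append hseg hseg2
        have htb : pvTailBlocks s d =
            (pvBRec (s.erase d)).map (d :: ·) ++ pvTailBlocks s d₂ := by
          rw [pvTailBlocks, hq, pv_dedupAdj_cons_sorted d₂ b' hq_sorted, List.flatMap_cons]
          congr 1
          rw [pvTailBlocks, hdw2]
        constructor
        · rw [htb]
          exact hcomp
        · rw [htb, List.getLast?_append_of_ne_nil]
          · exact hlast2
          · intro hcon
            rw [hcon] at hlast2
            simp at hlast2

lemma pv_seg_bRec (u : List String) (hu : u.Pairwise (· ≤ ·)) (hne : u ≠ []) :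
    PvSeg u (pvBRec u) none := by
  obtain ⟨d, t, rfl⟩ := List.exists_cons_of_ne_nil hne
  have h := pv_main (d :: t).length ((d :: t).dropWhile (fun x => decide (x ≤ d))).length
    (d :: t) d le_rfl le_rfl hu (by simp)
  rw [List.erase_cons_head, ← pv_bRec_eq_tailBlocks d t hu] at h
  exact h.1

-- ===== VERDICT (by name: the statement is the Claim_ definition above) =====
theorem lexicographic_symbol_tuple_iterator_py_spec : Claim_equal_lexicographic_symbol_tuple_iterator_py := by
  intro symbol_list _
  unfold Spec_lexicographic_symbol_tuple_iterator_py
  unfold lexicographic_symbol_tuple_iterator_py lexicographic_symbol_tuple_iterator_py_alt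
  by_cases hnil : symbol_list = []
  · simp [hnil]
  · have hlen : symbol_list.length ≠ 0 := by simpa using hnil
    rw [if_neg hlen, if_neg hnil]
    set u := PySem.List.sorted symbol_list (fun x => x) false with hu
    have hup : u.Pairwise (· ≤ ·) := PySem.List.sorted_pairwise symbol_list (fun x => x)
    have hune : u ≠ [] := by
      rw [hu, Ne, PySem.List.sorted_eq_nil_iff]; exact hnil
    have hseg := pv_seg_bRec u hup hune
    have hulen : u.length = symbol_list.length := by
      rw [hu]; exact (PySem.List.sorted_perm symbol_list (fun x => x) false).length_eq
    refine pv_seg_loop hseg _ ?_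
    rw [← hulen]
    exact pv_bRec_length u.length u le_rfl
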